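-- pv_equiv track=rewrite | github.com/caurdy/Olympic-Data-Analysis | OlympicDataAnalysis.py | prepare_plot
-- ===== SOURCE A (Python) =====
-- def prepare_plot(country_lst):
--
--     '''
--     Returns four sorted lists based off the inputted list of tuples
--     One list of years, three lists for each medal count ordered to the year list
--     Input
--         country_lst: A list of tuples from the country_stats dictionary
--
--     Creates a dictionary of year(key) and medals for that year (value)
--     Creates a year list by sorting the list of keys from created dictionary
--     Creates ordered medal lists by accessing  year/medal dict using year list
--
--     Return: tuple of year and medal lists
--     '''
--
--     year_medal_dict = {}
--     gold_lst,silv_lst,bronze_lst,return_lst = [],[],[],[]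
--
--
--     for ath_tup in country_lst:
--
--         if ath_tup[2] in year_medal_dict:
--             year_medal_dict[ath_tup[2]].append(ath_tup[-1])
--
--         else:
--             year_medal_dict[ath_tup[2]] = list()
--             year_medal_dict[ath_tup[2]].append(ath_tup[-1])
--
--     year_list = sorted(year_medal_dict.keys())
--
--     for year in year_list:
--         gold_cnt, silv_cnt, bronze_cnt = 0,0,0
--
--         for i in year_medal_dict[year]:
--
--             if i == 'gold':
--                 gold_cnt += 1
--
--             elif i == 'silver':
--                 silv_cnt += 1
--
--             elif i == 'bronze':
--                 bronze_cnt += 1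
--
--         gold_lst.append(gold_cnt)
--         silv_lst.append(silv_cnt)
--         bronze_lst.append(bronze_cnt)
--
--     return_lst.extend((year_list,gold_lst,silv_lst,bronze_lst))
--
--     return tuple(return_lst)
-- ===== SOURCE B (Python) =====
-- def prepare_plot(country_lst):
--     counts = {}
--     for ath_tup in country_lst:
--         c = counts.setdefault(ath_tup[2], [0, 0, 0])
--         medal = ath_tup[-1]
--         if medal == 'gold':
--             c[0] += 1
--         elif medal == 'silver':
--             c[1] += 1
--         elif medal == 'bronze':
--             c[2] += 1
--     year_list = sorted(counts)
--     return (year_list,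
--             [counts[y][0] for y in year_list],
--             [counts[y][1] for y in year_list],
--             [counts[y][2] for y in year_list])
-- ===== Notes on version B (the rewrite author's own statement) =====
-- stated objective: simpler
-- what changed: B counts gold/silver/bronze incrementally in one pass into a year -> [g,s,b] dict instead of first grouping all medal strings per year and re-scanning each year's list in a second nested loop; the output lists are read off the counters.
import Mathlib
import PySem

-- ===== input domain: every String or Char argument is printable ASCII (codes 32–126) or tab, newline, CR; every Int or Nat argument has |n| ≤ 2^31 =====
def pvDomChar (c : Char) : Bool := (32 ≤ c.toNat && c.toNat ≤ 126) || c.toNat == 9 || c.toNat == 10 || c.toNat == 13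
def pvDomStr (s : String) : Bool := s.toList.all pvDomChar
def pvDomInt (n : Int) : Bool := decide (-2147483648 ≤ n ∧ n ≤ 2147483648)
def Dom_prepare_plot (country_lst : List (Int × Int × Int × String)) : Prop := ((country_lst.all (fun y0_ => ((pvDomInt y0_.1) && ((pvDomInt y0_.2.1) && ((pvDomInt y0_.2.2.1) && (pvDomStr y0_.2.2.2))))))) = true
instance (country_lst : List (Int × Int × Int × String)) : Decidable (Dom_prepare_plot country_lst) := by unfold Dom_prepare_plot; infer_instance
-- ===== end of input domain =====

-- B change (objective 'simpler'): one counting pass into a year -> (g,s,b) dict instead of grouping medal strings per year and re-counting them in a second nested loop.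

-- ===== PORT A =====
-- A: group medal strings by year, sort the years, then count each year's list.
def prepare_plot (country_lst : List (Int × Int × Int × String)) : List Int × List Int × List Int × List Int :=
  let year_medal_dict : PySem.Dict Int (List String) :=
    country_lst.foldl (fun d ath_tup =>
      if d.contains ath_tup.2.2.1 then
        d.insert ath_tup.2.2.1 (d.getD ath_tup.2.2.1 [] ++ [ath_tup.2.2.2])
      else
        (d.insert ath_tup.2.2.1 ([] : List String)).insert ath_tup.2.2.1 ([] ++ [ath_tup.2.2.2]))
      PySem.Dict.empty
  let year_list := PySem.List.sorted year_medal_dict.keys (fun x => x) false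
  let lists := year_list.foldl (fun (acc : List Int × List Int × List Int) year =>
      let c := (year_medal_dict.getD year []).foldl (fun (c : Int × Int × Int) i =>
        if i == "gold" then (c.1 + 1, c.2.1, c.2.2)
        else if i == "silver" then (c.1, c.2.1 + 1, c.2.2)
        else if i == "bronze" then (c.1, c.2.1, c.2.2 + 1)
        else c) (0, 0, 0)
      (acc.1 ++ [c.1], acc.2.1 ++ [c.2.1], acc.2.2 ++ [c.2.2]))
    ([], [], [])
  (year_list, lists.1, lists.2.1, lists.2.2)

-- ===== PORT B =====
-- bump: the if/elif/elif increment on the [g,s,b] counter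
def pvBump (medal : String) (c : Int × Int × Int) : Int × Int × Int :=
  if medal == "gold" then (c.1 + 1, c.2.1, c.2.2)
  else if medal == "silver" then (c.1, c.2.1 + 1, c.2.2)
  else if medal == "bronze" then (c.1, c.2.1, c.2.2 + 1)
  else c

def prepare_plot_alt (country_lst : List (Int × Int × Int × String)) : List Int × List Int × List Int × List Int :=
  let counts : PySem.Dict Int (Int × Int × Int) :=
    country_lst.foldl (fun d ath_tup =>
      -- c = counts.setdefault(year, [0,0,0]); in-place increment of c = write back the bumped triple
      let d1 := d.setdefault ath_tup.2.2.1 (0, 0, 0)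
      d1.insert ath_tup.2.2.1 (pvBump ath_tup.2.2.2 (d1.getD ath_tup.2.2.1 (0, 0, 0))))
      PySem.Dict.empty
  let year_list := PySem.List.sorted counts.keys (fun x => x) false
  (year_list,
   year_list.map (fun y => (counts.getD y (0, 0, 0)).1),
   year_list.map (fun y => (counts.getD y (0, 0, 0)).2.1),
   year_list.map (fun y => (counts.getD y (0, 0, 0)).2.2))

-- ===== PRECONDITION & SPEC =====
def Spec_prepare_plot (country_lst : List (Int × Int × Int × String)) (out : List Int × List Int × List Int × List Int) : Prop := out = prepare_plot_alt country_lst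
instance (country_lst : List (Int × Int × Int × String)) (out : List Int × List Int × List Int × List Int) : Decidable (Spec_prepare_plot country_lst out) := by unfold Spec_prepare_plot; infer_instance

-- ===== CLAIM (what is proved, stated in full; the proofs are below) =====
def Claim_equal_prepare_plot : Prop := ∀ (country_lst : List (Int × Int × Int × String)), Dom_prepare_plot country_lst → Spec_prepare_plot country_lst (prepare_plot country_lst)

-- ===== LEMMAS AND PROOFS =====

-- inserting twice at the same key is one insert
theorem pv_insert_insert_same {ν : Type} (d : PySem.Dict Int ν) (k : Int) (v w : ν) :
    (d.insert k v).insert k w = d.insert k w := by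
  apply PySem.Dict.ext
  by_cases h : d.contains k = true
  · rw [PySem.Dict.items_insert_of_contains _ w (by simp [PySem.Dict.contains_insert]),
        PySem.Dict.items_insert_of_contains d v h,
        PySem.Dict.items_insert_of_contains d w h]
    simp only [List.map_map]
    apply List.map_congr_left
    intro p _
    by_cases hp : p.1 = k <;> simp [hp]
  · simp only [Bool.not_eq_true] at h
    rw [PySem.Dict.items_insert_of_contains _ w (by simp [PySem.Dict.contains_insert]),
        PySem.Dict.items_insert_of_not_contains d v h,
        PySem.Dict.items_insert_of_not_contains d w h]
    simp only [List.map_append, List.map_cons, List.map_nil, beq_self_eq_true, if_true]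
    apply congrArg (· ++ [(k, w)])
    conv_rhs => rw [← List.map_id d.items]
    apply List.map_congr_left
    intro p hp
    have hne : p.1 ≠ k := by
      intro hk
      have hm : k ∈ d.keys := hk ▸ PySem.Dict.mem_keys_of_mem_items d hp
      exact absurd ((PySem.Dict.contains_iff_mem_keys d k).mpr hm) (by simp [h])
    simp [hne]

-- A's build step IS a modify at the year key
theorem pv_stepA_eq_modify (d : PySem.Dict Int (List String)) (t : Int × Int × Int × String) :
    (if d.contains t.2.2.1 then
        d.insert t.2.2.1 (d.getD t.2.2.1 [] ++ [t.2.2.2])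
      else
        (d.insert t.2.2.1 ([] : List String)).insert t.2.2.1 ([] ++ [t.2.2.2]))
      = d.modify t.2.2.1 [] (· ++ [t.2.2.2]) := by
  by_cases h : d.contains t.2.2.1 = true
  · simp [h, PySem.Dict.modify]
  · simp only [h]
    rw [pv_insert_insert_same]
    simp only [Bool.not_eq_true] at h
    simp [PySem.Dict.modify, PySem.Dict.getD_of_not_contains d _ h]

-- B's build step IS a modify at the year key
theorem pv_stepB_eq_modify (d : PySem.Dict Int (Int × Int × Int)) (t : Int × Int × Int × String) :
    (let d1 := d.setdefault t.2.2.1 (0, 0, 0)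
     d1.insert t.2.2.1 (pvBump t.2.2.2 (d1.getD t.2.2.1 (0, 0, 0))))
      = d.modify t.2.2.1 (0, 0, 0) (pvBump t.2.2.2) := by
  by_cases h : d.contains t.2.2.1 = true
  · simp [PySem.Dict.setdefault, h, PySem.Dict.modify]
  · simp only [Bool.not_eq_true] at h
    have hs : d.setdefault t.2.2.1 (0, 0, 0) = d.insert t.2.2.1 (0, 0, 0) := by
      apply PySem.Dict.ext
      rw [PySem.Dict.items_insert_of_not_contains d _ h]
      simp [PySem.Dict.setdefault, h]
    simp only [hs]
    rw [PySem.Dict.getD_insert_self, pv_insert_insert_same]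
    simp [PySem.Dict.modify, PySem.Dict.getD_of_not_contains d _ h]

-- B's counter dict read back: the fold of pvBump over the year's medals
theorem pv_getD_B (l : List (Int × String)) (d : PySem.Dict Int (Int × Int × Int)) (y : Int) :
    (l.foldl (fun d p => d.modify p.1 (0, 0, 0) (pvBump p.2)) d).getD y (0, 0, 0)
      = ((l.filter (fun p => p.1 == y)).map (·.2)).foldl (fun c m => pvBump m c) (d.getD y (0, 0, 0)) := by
  induction l generalizing d with
  | nil => rfl
  | cons p t ih =>
    by_cases h : p.1 = y
    · subst h
      simp [ih, PySem.Dict.getD_modify_self]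
    · simp [h, ih, PySem.Dict.getD_modify_of_ne d _ _ (Ne.symm h)]

-- A's inner counting loop is the pvBump fold
theorem pv_inner_eq_bump (ms : List String) (c0 : Int × Int × Int) :
    ms.foldl (fun (c : Int × Int × Int) i =>
        if i == "gold" then (c.1 + 1, c.2.1, c.2.2)
        else if i == "silver" then (c.1, c.2.1 + 1, c.2.2)
        else if i == "bronze" then (c.1, c.2.1, c.2.2 + 1)
        else c) c0
      = ms.foldl (fun c m => pvBump m c) c0 := rfl

-- A's outer append loop builds the three maps
theorem pv_outer_maps (ys : List Int) (cnt : Int → Int × Int × Int) (acc : List Int × List Int × List Int) :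
    ys.foldl (fun (acc : List Int × List Int × List Int) y =>
        (acc.1 ++ [(cnt y).1], acc.2.1 ++ [(cnt y).2.1], acc.2.2 ++ [(cnt y).2.2])) acc
      = (acc.1 ++ ys.map (fun y => (cnt y).1),
         acc.2.1 ++ ys.map (fun y => (cnt y).2.1),
         acc.2.2 ++ ys.map (fun y => (cnt y).2.2)) := by
  induction ys generalizing acc with
  | nil => simp
  | cons y t ih => simp [ih]

-- ===== VERDICT (by name: the statement is the Claim_ definition above) =====
theorem prepare_plot_spec : Claim_equal_prepare_plot := by
  intro l _
  unfold Spec_prepare_plot prepare_plot prepare_plot_alt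
  -- rewrite both build loops as folds over the (year, medal) pairs, in modify form
  have hA : l.foldl (fun (d : PySem.Dict Int (List String)) ath_tup =>
      if d.contains ath_tup.2.2.1 then
        d.insert ath_tup.2.2.1 (d.getD ath_tup.2.2.1 [] ++ [ath_tup.2.2.2])
      else
        (d.insert ath_tup.2.2.1 ([] : List String)).insert ath_tup.2.2.1 ([] ++ [ath_tup.2.2.2]))
      PySem.Dict.empty
      = (l.map (fun t => (t.2.2.1, t.2.2.2))).foldl (fun d p => d.modify p.1 [] (· ++ [p.2])) PySem.Dict.empty := by
    rw [List.foldl_map]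
    exact PySem.List.foldl_congr_mem _ _ _ _ (fun d t _ => pv_stepA_eq_modify d t)
  have hB : l.foldl (fun (d : PySem.Dict Int (Int × Int × Int)) ath_tup =>
      let d1 := d.setdefault ath_tup.2.2.1 (0, 0, 0)
      d1.insert ath_tup.2.2.1 (pvBump ath_tup.2.2.2 (d1.getD ath_tup.2.2.1 (0, 0, 0))))
      PySem.Dict.empty
      = (l.map (fun t => (t.2.2.1, t.2.2.2))).foldl (fun d p => d.modify p.1 (0, 0, 0) (pvBump p.2)) PySem.Dict.empty := by
    rw [List.foldl_map]
    exact PySem.List.foldl_congr_mem _ _ _ _ (fun d t _ => pv_stepB_eq_modify d t)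
  simp only [hA, hB]
  set lp := l.map (fun t => (t.2.2.1, t.2.2.2)) with hlp
  -- both dicts have the same keys
  have hkeys : (lp.foldl (fun (d : PySem.Dict Int (List String)) p => d.modify p.1 [] (· ++ [p.2])) PySem.Dict.empty).keys
      = (lp.foldl (fun (d : PySem.Dict Int (Int × Int × Int)) p => d.modify p.1 (0, 0, 0) (pvBump p.2)) PySem.Dict.empty).keys := by
    rw [PySem.Dict.keys_foldl_modify_key (key := Prod.fst), PySem.Dict.keys_foldl_modify_key (key := Prod.fst)]
    rfl
  rw [pv_outer_maps, hkeys]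
  refine Prod.ext rfl (Prod.ext ?_ (Prod.ext ?_ ?_)) <;>
  · simp only [List.nil_append]
    apply List.map_congr_left
    intro y _
    rw [pv_inner_eq_bump, PySem.Dict.getD_foldl_modify_append, pv_getD_B]
    simp [PySem.Dict.getD_empty]
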